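-- pv_equiv track=rewrite | github.com/kamilGie/WDI | Zestaw_2:_Tablice_jednowymiarowe/82/rozwiazanie82.py | kwadrat_liczby_tablicowej
-- ===== SOURCE A (Python) =====
-- def kwadrat_liczby_tablicowej(T):
--     wynik = [0] * (len(T) * 2)
--     for el1 in range(len(T)):
--         for el2 in range(len(T)):
--             mnożone_elementy = T[el1] * T[el2]
--             wynik[el1 + el2] += mnożone_elementy
--             wynik[el1 + el2 + 1] += wynik[el1 + el2] // 10000000000
--             wynik[el1 + el2] %= 10000000000
--
--     return wynik
-- ===== SOURCE B (Python) =====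
-- def kwadrat_liczby_tablicowej(T):
--     BASE = 10 ** 10
--     s = 0
--     for d in reversed(T):
--         s = s * BASE + d
--     sq = s * s
--     wynik = []
--     for _ in range(2 * len(T)):
--         sq, r = divmod(sq, BASE)
--         wynik.append(r)
--     return wynik
-- ===== Notes on version B (the rewrite author's own statement) =====
-- stated objective: faster
-- what changed: Replaces the quadratic schoolbook digit-by-digit multiplication with carry juggling by packing the base-10^10 array into one Python int, squaring it with CPython's subquadratic big-int multiplication, and unpacking the square back into 2n base-10^10 digits.
import Mathlib
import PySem

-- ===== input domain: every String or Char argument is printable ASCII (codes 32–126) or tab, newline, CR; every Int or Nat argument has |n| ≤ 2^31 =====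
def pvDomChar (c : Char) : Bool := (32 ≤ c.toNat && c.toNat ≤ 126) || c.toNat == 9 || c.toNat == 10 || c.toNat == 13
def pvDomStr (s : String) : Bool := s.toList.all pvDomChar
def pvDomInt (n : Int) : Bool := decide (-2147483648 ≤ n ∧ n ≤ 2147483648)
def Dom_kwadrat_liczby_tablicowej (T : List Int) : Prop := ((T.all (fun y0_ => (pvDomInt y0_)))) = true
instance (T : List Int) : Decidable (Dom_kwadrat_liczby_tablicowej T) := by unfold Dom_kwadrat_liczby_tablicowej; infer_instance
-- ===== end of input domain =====

-- B packs the array into one big integer, squares it, and unpacks — asymptotically faster than A's schoolbook O(n^2) loop (CPython's subquadratic multiplication).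

-- ===== PORT A =====
-- one body of A's inner loop: wynik[k] += T[el1]*T[el2]; wynik[k+1] += wynik[k] // 10^10; wynik[k] %= 10^10
def pvStepA (T : List Int) (w : List Int) (el1 el2 : Nat) : List Int :=
  let p := T.getD el1 0 * T.getD el2 0
  let w1 := w.set (el1 + el2) (w.getD (el1 + el2) 0 + p)
  let w2 := w1.set (el1 + el2 + 1)
      (w1.getD (el1 + el2 + 1) 0 + PySem.Int.floordiv (w1.getD (el1 + el2) 0) 10000000000)
  w2.set (el1 + el2) (PySem.Int.mod (w2.getD (el1 + el2) 0) 10000000000)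

def kwadrat_liczby_tablicowej (T : List Int) : List Int :=
  (List.range T.length).foldl (fun w el1 =>
      (List.range T.length).foldl (fun w el2 => pvStepA T w el1 el2) w)
    (List.replicate (T.length * 2) 0)

-- ===== PORT B =====
def kwadrat_liczby_tablicowej_alt (T : List Int) : List Int :=
  let s := T.reverse.foldl (fun s d => s * 10000000000 + d) 0
  let sq := s * s
  ((List.range (2 * T.length)).foldl
      (fun (st : Int × List Int) _ =>
        (PySem.Int.floordiv st.1 10000000000, st.2 ++ [PySem.Int.mod st.1 10000000000]))
      (sq, [])).2

-- ===== PRECONDITION & SPEC =====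
def Spec_kwadrat_liczby_tablicowej (T : List Int) (out : List Int) : Prop := out = kwadrat_liczby_tablicowej_alt T
instance (T : List Int) (out : List Int) : Decidable (Spec_kwadrat_liczby_tablicowej T out) := by unfold Spec_kwadrat_liczby_tablicowej; infer_instance

-- ===== CLAIM (what is proved, stated in full; the proofs are below) =====
def Claim_equal_kwadrat_liczby_tablicowej : Prop := ∀ (T : List Int), Dom_kwadrat_liczby_tablicowej T → Spec_kwadrat_liczby_tablicowej T (kwadrat_liczby_tablicowej T)

-- ===== LEMMAS AND PROOFS =====

-- the base 10^10, abbreviated in the proofs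
def pvB : Int := 10000000000

theorem pvB_pos : (0:Int) < pvB := by norm_num [pvB]

-- digit j of the working array (Python's wynik[j]; always in range where used)
def pvDig (w : List Int) (j : Nat) : Int := w.getD j 0

-- value represented by a little-endian base-10^10 array
def pvVal : List Int → Int
  | [] => 0
  | d :: w => d + pvB * pvVal w

-- the unique reduced representation: m least-significant base-10^10 digits of v
def pvUnpack : Int → Nat → List Int
  | _, 0 => []
  | v, m + 1 => v % pvB :: pvUnpack (v / pvB) m

theorem pvVal_set (w : List Int) (k : Nat) (x : Int) (h : k < w.length) :
    pvVal (w.set k x) = pvVal w + (x - pvDig w k) * pvB ^ k := by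
  induction w generalizing k with
  | nil => simp at h
  | cons d w ih =>
    cases k with
    | zero => simp [pvVal, pvDig]; ring
    | succ k =>
      simp only [List.set_cons_succ, pvVal]
      rw [ih k (by simpa using h)]
      simp [pvDig, pow_succ]
      ring

theorem pvVal_append (xs ys : List Int) :
    pvVal (xs ++ ys) = pvVal xs + pvB ^ xs.length * pvVal ys := by
  induction xs with
  | nil => simp [pvVal]
  | cons d xs ih => simp [pvVal, ih, pow_succ]; ring

theorem pvVal_bounds (xs : List Int) (h : ∀ j, j < xs.length → 0 ≤ pvDig xs j ∧ pvDig xs j < pvB) :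
    0 ≤ pvVal xs ∧ pvVal xs < pvB ^ xs.length := by
  induction xs with
  | nil => simp [pvVal]
  | cons d xs ih =>
    have h0 := h 0 (by simp)
    have ht := ih (fun j hj => by simpa [pvDig] using h (j+1) (by simpa using hj))
    simp only [pvDig, List.getD_cons_zero] at h0
    constructor
    · have := ht.1; simp only [pvVal]; nlinarith [pvB_pos]
    · simp only [pvVal, List.length_cons, pow_succ]
      nlinarith [pvB_pos, ht.1, ht.2]

theorem pvVal_abs_bound (xs : List Int) (h : ∀ x ∈ xs, pvDomInt x = true) :
    |pvVal xs| ≤ pvB ^ xs.length - 1 := by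
  induction xs with
  | nil => simp [pvVal]
  | cons d xs ih =>
    have hd : |d| ≤ pvB - 1 := by
      have := h d (by simp)
      simp [pvDomInt] at this
      rw [abs_le]; norm_num [pvB]; omega
    have ht := ih (fun x hx => h x (by simp [hx]))
    have hd' := abs_le.mp hd
    have ht' := abs_le.mp ht
    rw [abs_le]
    simp only [pvVal, List.length_cons, pow_succ]
    constructor <;> nlinarith [pvB_pos, pow_pos pvB_pos xs.length]

-- uniqueness of the reduced representation
theorem pvUnpack_val (w : List Int) (h : ∀ j, j < w.length → 0 ≤ pvDig w j ∧ pvDig w j < pvB) :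
    pvUnpack (pvVal w) w.length = w := by
  induction w with
  | nil => rfl
  | cons d w ih =>
    have h0 := h 0 (by simp)
    simp only [pvDig, List.getD_cons_zero] at h0
    have hmod : (d + pvB * pvVal w) % pvB = d := by
      rw [Int.add_mul_emod_self_left, Int.emod_eq_of_lt h0.1 h0.2]
    have hdiv : (d + pvB * pvVal w) / pvB = pvVal w := by
      rw [Int.add_mul_ediv_left _ _ (by exact_mod_cast pvB_pos.ne'),
        Int.ediv_eq_zero_of_lt h0.1 h0.2, zero_add]
    simp only [pvVal, List.length_cons, pvUnpack, hmod, hdiv]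
    rw [ih (fun j hj => by simpa [pvDig] using h (j+1) (by simpa using hj))]

-- ----- B-side characterisation -----

theorem pvPack_eq_val (T : List Int) :
    T.reverse.foldl (fun s d => s * 10000000000 + d) 0 = pvVal T := by
  rw [List.foldl_reverse]
  induction T with
  | nil => rfl
  | cons d T ih => simp only [List.foldr_cons, ih, pvVal, pvB]; ring

theorem pvUnpackLoop (l : List Nat) (v : Int) (out : List Int) :
    ((l.foldl (fun (st : Int × List Int) _ =>
        (PySem.Int.floordiv st.1 10000000000, st.2 ++ [PySem.Int.mod st.1 10000000000]))
      (v, out)).2) = out ++ pvUnpack v l.length := by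
  induction l generalizing v out with
  | nil => simp [pvUnpack]
  | cons a l ih =>
    simp only [List.foldl_cons]
    rw [ih]
    simp only [List.length_cons, pvUnpack,
      PySem.Int.floordiv_eq_ediv_of_pos (b := 10000000000) (by norm_num),
      PySem.Int.mod_eq_emod_of_pos (b := 10000000000) (by norm_num)]
    simp [pvB]

theorem pvAlt_eq_unpack (T : List Int) :
    kwadrat_liczby_tablicowej_alt T = pvUnpack (pvVal T * pvVal T) (2 * T.length) := by
  unfold kwadrat_liczby_tablicowej_alt
  rw [pvPack_eq_val, pvUnpackLoop]
  simp

-- ----- A-side invariant -----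

-- digit is a valid base-10^10 digit
def pvOK (w : List Int) (j : Nat) : Prop := 0 ≤ pvDig w j ∧ pvDig w j < pvB

-- the first m iterations of A's inner loop for row el1 = i
def pvRowA (T : List Int) (i : Nat) (w : List Int) (m : Nat) : List Int :=
  (List.range m).foldl (fun w el2 => pvStepA T w i el2) w

-- the first i iterations of A's outer loop
def pvLoopA (T : List Int) (i : Nat) : List Int :=
  (List.range i).foldl (fun w el1 => pvRowA T el1 w T.length)
    (List.replicate (T.length * 2) 0)

theorem pvA_eq_loop (T : List Int) : kwadrat_liczby_tablicowej T = pvLoopA T T.length := rfl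

theorem pvGetD_set_self (w : List Int) (k : Nat) (x : Int) (h : k < w.length) :
    (w.set k x).getD k 0 = x := by
  simp [List.getD, h]

theorem pvGetD_set_ne (w : List Int) (k j : Nat) (x : Int) (h : j ≠ k) :
    (w.set k x).getD j 0 = w.getD j 0 := by
  simp [List.getD, List.getElem?_set_ne (by omega : k ≠ j)]

theorem pvStepA_spec (T w : List Int) (el1 el2 : Nat)
    (hlen : el1 + el2 + 1 < w.length) :
    (pvStepA T w el1 el2).length = w.length ∧
    pvVal (pvStepA T w el1 el2) = pvVal w + T.getD el1 0 * T.getD el2 0 * pvB ^ (el1 + el2) ∧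
    (∀ j, j ≠ el1 + el2 → j ≠ el1 + el2 + 1 → pvDig (pvStepA T w el1 el2) j = pvDig w j) ∧
    pvOK (pvStepA T w el1 el2) (el1 + el2) := by
  have hB := pvB_pos
  unfold pvStepA
  rw [show (10000000000 : Int) = pvB from rfl]
  set k := el1 + el2 with hkdef
  have hk : k < w.length := by omega
  set p := T.getD el1 0 * T.getD el2 0 with hp
  set a := w.getD k 0 with ha
  set w1 := w.set k (a + p) with hw1
  have l1 : w1.length = w.length := by rw [hw1]; simp
  have g1k : w1.getD k 0 = a + p := by rw [hw1]; exact pvGetD_set_self _ _ _ hk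
  set c := PySem.Int.floordiv (w1.getD k 0) pvB with hc
  set w2 := w1.set (k + 1) (w1.getD (k + 1) 0 + c) with hw2
  have l2 : w2.length = w.length := by rw [hw2]; simp [l1]
  have g2k : w2.getD k 0 = a + p := by
    rw [hw2, pvGetD_set_ne _ _ _ _ (by omega)]; exact g1k
  set w3 := w2.set k (PySem.Int.mod (w2.getD k 0) pvB) with hw3
  have l3 : w3.length = w.length := by rw [hw3]; simp [l2]
  have hfm := PySem.Int.floordiv_mul_add_mod (a + p) pvB
  refine ⟨l3, ?_, ?_, ?_⟩
  · -- value
    have v1 : pvVal w1 = pvVal w + p * pvB ^ k := by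
      rw [hw1, pvVal_set _ _ _ hk]
      have : pvDig w k = a := ha.symm
      rw [this]; ring
    have v2 : pvVal w2 = pvVal w1 + c * pvB ^ (k + 1) := by
      rw [hw2, pvVal_set _ _ _ (by omega)]
      have : pvDig w1 (k + 1) = w1.getD (k + 1) 0 := rfl
      rw [this]; ring
    have v3 : pvVal w3 = pvVal w2 + (PySem.Int.mod (a + p) pvB - (a + p)) * pvB ^ k := by
      rw [hw3, pvVal_set _ _ _ (by omega)]
      have : pvDig w2 k = w2.getD k 0 := rfl
      rw [this, g2k]
    rw [v3, v2, v1, hc, g1k]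
    have hps : pvB ^ (k + 1) = pvB ^ k * pvB := pow_succ _ _
    rw [hps]
    linear_combination (pvB ^ k) * hfm
  · -- untouched digits
    intro j hj1 hj2
    simp only [pvDig]
    rw [hw3, pvGetD_set_ne _ _ _ _ hj1, hw2, pvGetD_set_ne _ _ _ _ hj2,
      hw1, pvGetD_set_ne _ _ _ _ hj1]
  · -- the digit just written is reduced
    have : pvDig w3 k = PySem.Int.mod (a + p) pvB := by
      simp only [pvDig]
      rw [hw3, g2k, pvGetD_set_self _ _ _ (by omega)]
    exact ⟨by rw [this]; exact PySem.Int.mod_nonneg _ hB,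
           by rw [this]; exact PySem.Int.mod_lt _ hB⟩

theorem pvTake_succ_val (T : List Int) (m : Nat) (hm : m < T.length) :
    pvVal (T.take (m + 1)) = pvVal (T.take m) + T.getD m 0 * pvB ^ m := by
  rw [List.take_add_one, List.getElem?_eq_getElem hm]
  simp only [Option.toList_some]
  rw [pvVal_append]
  simp [pvVal, List.getD, List.getElem?_eq_getElem hm, Nat.min_eq_left (le_of_lt hm)]
  ring

theorem pvRowA_spec (T : List Int) (i : Nat) (hi : i < T.length) :
    ∀ (m : Nat), m ≤ T.length → ∀ (w : List Int), w.length = 2 * T.length →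
    (∀ j, j < i → pvOK w j) →
    (pvRowA T i w m).length = 2 * T.length ∧
    pvVal (pvRowA T i w m) = pvVal w + T.getD i 0 * pvB ^ i * pvVal (T.take m) ∧
    (∀ j, j < i → pvDig (pvRowA T i w m) j = pvDig w j) ∧
    (∀ j, j < i + m → pvOK (pvRowA T i w m) j) := by
  intro m
  induction m with
  | zero =>
    intro _ w hw hok
    refine ⟨hw, by simp [pvRowA, pvVal], fun j _ => rfl, fun j hj => hok j (by omega)⟩
  | succ m ih =>
    intro hm w hw hok
    have hrec := ih (by omega) w hw hok
    obtain ⟨hl, hv, hu, hd⟩ := hrec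
    have hstep_eq : pvRowA T i w (m + 1) = pvStepA T (pvRowA T i w m) i m := by
      simp [pvRowA, List.range_succ]
    have hs := pvStepA_spec T (pvRowA T i w m) i m (by omega)
    obtain ⟨sl, sv, su, sd⟩ := hs
    rw [hstep_eq]
    refine ⟨by rw [sl, hl], ?_, ?_, ?_⟩
    · rw [sv, hv, pvTake_succ_val T m (by omega)]
      have : pvB ^ (i + m) = pvB ^ i * pvB ^ m := pow_add _ _ _
      rw [this]; ring
    · intro j hj
      rw [su j (by omega) (by omega)]; exact hu j hj
    · intro j hj
      rcases Nat.lt_or_ge j (i + m) with h | h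
      · have hne1 : j ≠ i + m := by omega
        have hne2 : j ≠ i + m + 1 := by omega
        have hdj := hd j h
        simp only [pvOK, su j hne1 hne2]
        exact hdj
      · have : j = i + m := by omega
        rw [this]; exact sd

theorem pvDig_replicate (m j : Nat) : pvDig (List.replicate m (0 : Int)) j = 0 := by
  simp only [pvDig, List.getD, List.getElem?_replicate]
  split <;> simp

theorem pvVal_replicate (m : Nat) : pvVal (List.replicate m (0 : Int)) = 0 := by
  induction m with
  | zero => rfl
  | succ m ih => simp [List.replicate_succ, pvVal, ih]

theorem pvLoopA_spec (T : List Int) :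
    ∀ (i : Nat), i ≤ T.length →
    (pvLoopA T i).length = 2 * T.length ∧
    pvVal (pvLoopA T i) = pvVal (T.take i) * pvVal T ∧
    (∀ j, j + 1 < i + T.length → pvOK (pvLoopA T i) j) := by
  intro i
  induction i with
  | zero =>
    intro _
    refine ⟨by simp [pvLoopA]; ring, by simp [pvLoopA, pvVal_replicate, pvVal], ?_⟩
    intro j _
    unfold pvLoopA
    simp only [List.range_zero, List.foldl_nil]
    exact ⟨le_of_eq (pvDig_replicate _ _).symm, by rw [pvDig_replicate]; exact pvB_pos⟩
  | succ i ih =>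
    intro hi1
    have hi : i < T.length := by omega
    obtain ⟨hl, hv, hd⟩ := ih (by omega)
    have hrow := pvRowA_spec T i hi T.length le_rfl (pvLoopA T i) hl
      (fun j hj => hd j (by omega))
    obtain ⟨rl, rv, ru, rd⟩ := hrow
    have hloop_eq : pvLoopA T (i + 1) = pvRowA T i (pvLoopA T i) T.length := by
      simp [pvLoopA, List.range_succ, pvRowA]
    rw [hloop_eq]
    refine ⟨rl, ?_, ?_⟩
    · rw [rv, hv, List.take_length, pvTake_succ_val T i hi]
      ring
    · intro j hj
      rcases Nat.lt_or_ge j i with h | h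
      · have hdj := hd j (by omega)
        simp only [pvOK, ru j h]
        exact hdj
      · exact rd j (by omega)

-- digits of a take are digits of the whole list
theorem pvDig_take (w : List Int) (m j : Nat) (hj : j < m) :
    pvDig (w.take m) j = pvDig w j := by
  simp only [pvDig, List.getD]
  rw [List.getElem?_take_of_lt hj]



-- ===== VERDICT (by name: the statement is the Claim_ definition above) =====
theorem kwadrat_liczby_tablicowej_spec : Claim_equal_kwadrat_liczby_tablicowej := by
  intro T hdom
  unfold Spec_kwadrat_liczby_tablicowej
  by_cases hn0 : T.length = 0
  · rw [List.eq_nil_of_length_eq_zero hn0]; rfl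
  · have hB := pvB_pos
    set n := T.length with hn
    have hn1 : 1 ≤ n := by omega
    obtain ⟨hl, hv, hd⟩ := pvLoopA_spec T n le_rfl
    set w := pvLoopA T n with hw
    rw [pvA_eq_loop, pvAlt_eq_unpack, ← hn, ← hw]
    have hvw : pvVal w = pvVal T * pvVal T := by rw [hv, List.take_length]
    have hmem : ∀ x ∈ T, pvDomInt x = true := by
      simpa [Dom_kwadrat_liczby_tablicowej, List.all_eq_true] using hdom
    have hS := pvVal_abs_bound T hmem
    have hBn := pow_pos pvB_pos n
    have hsq0 : 0 ≤ pvVal T * pvVal T := mul_self_nonneg _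
    have hsq1 : pvVal T * pvVal T < pvB ^ (2 * n) := by
      have h2 : pvB ^ (2 * n) = pvB ^ n * pvB ^ n := by rw [two_mul, pow_add]
      rw [h2]
      nlinarith [abs_mul_abs_self (pvVal T), abs_nonneg (pvVal T)]
    set m := 2 * n - 1 with hm
    have hm1 : m + 1 = 2 * n := by omega
    have hmlt : m < w.length := by omega
    have hdropw : w.drop m = [pvDig w m] := by
      rw [List.drop_eq_getElem_cons hmlt]
      have h1 : w[m] = pvDig w m := by
        simp [pvDig, List.getD, List.getElem?_eq_getElem hmlt]
      have h2 : w.drop (m + 1) = [] := by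
        rw [show m + 1 = w.length by omega, List.drop_length]
      rw [h1, h2]
    have hsplit : pvVal w = pvVal (w.take m) + pvB ^ m * pvDig w m := by
      conv_lhs => rw [← List.take_append_drop m w]
      rw [pvVal_append, hdropw]
      simp [pvVal, List.length_take, Nat.min_eq_left (le_of_lt hmlt)]
    have hlo := pvVal_bounds (w.take m) (fun j hj' => by
      have hjm : j < m := by
        simp [List.length_take] at hj'
        exact hj'.1
      rw [pvDig_take w m j hjm]
      exact hd j (by omega))
    have hlotake : (w.take m).length = m := by
      simp [List.length_take]; omega
    rw [hlotake] at hlo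
    set t := pvDig w m with ht
    have hsum : pvVal (w.take m) + pvB ^ m * t = pvVal T * pvVal T := by
      rw [← hsplit, hvw]
    have hBm := pow_pos pvB_pos m
    have htlb : 0 ≤ t := by
      by_contra hneg
      push Not at hneg
      have h1 : pvB ^ m * t ≤ pvB ^ m * (-1) :=
        mul_le_mul_of_nonneg_left (by omega) (le_of_lt hBm)
      nlinarith [hlo.2, hsq0]
    have htub : t < pvB := by
      by_contra hge
      push Not at hge
      have h1 : pvB ^ m * pvB ≤ pvB ^ m * t :=
        mul_le_mul_of_nonneg_left hge (le_of_lt hBm)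
      have hpow : pvB ^ m * pvB = pvB ^ (2 * n) := by rw [← pow_succ, hm1]
      nlinarith [hlo.1, hsq1]
    have hall : ∀ j, j < w.length → 0 ≤ pvDig w j ∧ pvDig w j < pvB := by
      intro j hj
      rcases Nat.lt_or_ge j m with h | h
      · exact hd j (by omega)
      · have hjm : j = m := by omega
        rw [hjm, ← ht]; exact ⟨htlb, htub⟩
    have huniq := pvUnpack_val w hall
    rw [hvw, hl] at huniq
    exact huniq.symm
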